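-- pv_equiv track=rewrite | github.com/sabzi1984/Intro-to-Algorithms | independent nodes.py | independent_set_decision
-- ===== SOURCE A (Python) =====
-- def k_subsets(lst, k):
--     if len(lst) < k:
--         return []
--     if len(lst) == k:
--         return [lst]
--     if k == 1:
--         return [[i] for i in lst]
--     return k_subsets(lst[1:],k) +list( map(lambda x: x + [lst[0]], k_subsets(lst[1:], k-1)))
--
-- def is_clique(G, nodes):
--     for pair in k_subsets(nodes, 2):
--         if pair[1] not in G[pair[0]]:
--             return False
--     return True
--
-- def k_clique_decision(G, k):
--     nodes = list(G.keys())
--     for i in range(k, len(nodes) + 1):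
--         for subset in k_subsets(nodes, i):
--             if is_clique(G, subset):
--                 return True
--     return False
--
-- def make_link(G, node1, node2):
--     if node1 not in G:
--         G[node1] = {}
--     (G[node1])[node2] = 1
--     if node2 not in G:
--         G[node2] = {}
--     (G[node2])[node1] = 1
--     return G
--
-- def independent_set_decision(H, s):
--     nodes=list(H.keys())
--     G={}
--     if s==1:
--         return True
--     for node1 in nodes:
--         for node2 in nodes:
--             if node1>node2:
--                 if node1 not in H[node2]:
--                     make_link(G, node1, node2)
--     if k_clique_decision(G, s):
--         return True
--     return False
-- ===== SOURCE B (Python) =====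
-- from itertools import combinations
--
-- def independent_set_decision(H, s):
--     if s == 1:
--         return True
--     nodes = list(H.keys())
--     if s > len(nodes):
--         return False
--     for sub in combinations(nodes, s):
--         if all((u not in H[v]) if u > v else (v not in H[u])
--                for u, v in combinations(sub, 2)):
--             return True
--     return False
-- ===== Notes on version B (the rewrite author's own statement) =====
-- stated objective: simpler
-- what changed: Drops the complement-graph construction and the clique search over every size from s to n with the recursive k_subsets generator; B enumerates the size-s combinations of H's keys once and tests each directly for pairwise independence in H.
-- outside the precondition, e.g. on independent_set_decision({}, 0): A returns True, B returns True
import Mathlib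
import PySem

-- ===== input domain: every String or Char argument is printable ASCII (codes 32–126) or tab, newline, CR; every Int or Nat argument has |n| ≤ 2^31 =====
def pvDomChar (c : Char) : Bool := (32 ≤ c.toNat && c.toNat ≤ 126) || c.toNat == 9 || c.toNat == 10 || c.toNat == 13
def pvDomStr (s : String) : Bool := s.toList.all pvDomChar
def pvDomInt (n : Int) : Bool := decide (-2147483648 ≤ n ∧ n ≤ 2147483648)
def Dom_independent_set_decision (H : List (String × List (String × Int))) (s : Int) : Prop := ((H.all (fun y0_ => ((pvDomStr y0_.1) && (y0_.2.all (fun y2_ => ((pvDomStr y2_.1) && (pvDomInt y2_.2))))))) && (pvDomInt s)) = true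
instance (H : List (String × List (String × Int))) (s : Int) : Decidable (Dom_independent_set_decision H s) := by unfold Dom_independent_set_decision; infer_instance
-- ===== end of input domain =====

-- B replaces A's complement-graph clique search by a direct scan of the size-s
-- combinations of H's keys with a pairwise independence test (simpler, no complement graph).

-- ===== PORT A =====
def kSubsets (lst : List String) (k : Int) : List (List String) :=
  if (lst.length : Int) < k then []
  else if (lst.length : Int) = k then [lst]
  else if k = 1 then lst.map (fun i => [i])
  else
    match lst with
    | [] => []  -- Python diverges here (reachable only for k < 0, outside Pre_)
    | a :: tail => kSubsets tail k ++ (kSubsets tail (k - 1)).map (fun x => x ++ [a])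
termination_by lst.length

def isClique (G : PySem.Dict String (PySem.Dict String Int)) (nodes : List String) : Bool :=
  -- `G[pair[0]]` never misses a key at A's call sites (nodes ⊆ G.keys), so getD is exact there
  (kSubsets nodes 2).all (fun pair =>
    (G.getD (PySem.List.pyGetD pair 0 "") PySem.Dict.empty).contains (PySem.List.pyGetD pair 1 ""))

def kCliqueDecision (G : PySem.Dict String (PySem.Dict String Int)) (k : Int) : Bool :=
  let nodes := G.keys
  (PySem.List.pyRange k ((nodes.length : Int) + 1) 1).any
    (fun i => (kSubsets nodes i).any (fun subset => isClique G subset))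

def makeLink (G : PySem.Dict String (PySem.Dict String Int)) (node1 node2 : String) :
    PySem.Dict String (PySem.Dict String Int) :=
  (G.modify node1 PySem.Dict.empty (fun d => d.insert node2 1)).modify node2 PySem.Dict.empty
    (fun d => d.insert node1 1)

def independent_set_decision (H : List (String × List (String × Int))) (s : Int) : Bool :=
  let Hd := PySem.Dict.ofList H
  let nodes := Hd.keys
  if s = 1 then true
  else
    let G := nodes.foldl (fun G node1 =>
      nodes.foldl (fun G node2 =>
        if PySem.Chars.strLt node2.toList node1.toList then
          if (Hd.getD node2 []).any (fun p => p.1 == node1) then G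
          else makeLink G node1 node2
        else G) G) PySem.Dict.empty
    if kCliqueDecision G s then true else false

-- ===== PORT B =====
def pairOk (Hd : PySem.Dict String (List (String × Int))) (u v : String) : Bool :=
  if PySem.Chars.strLt v.toList u.toList then !((Hd.getD v []).any (fun p => p.1 == u))
  else !((Hd.getD u []).any (fun p => p.1 == v))

def indepAll (Hd : PySem.Dict String (List (String × Int))) : List String → Bool
  | [] => true
  | u :: rest => rest.all (fun v => pairOk Hd u v) && indepAll Hd rest

def independent_set_decision_alt (H : List (String × List (String × Int))) (s : Int) : Bool :=
  if s = 1 then true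
  else if ((PySem.Dict.ofList H).keys.length : Int) < s then false
  else
    (PySem.List.combinations (PySem.Dict.ofList H).keys s.toNat).any
      (fun sub => indepAll (PySem.Dict.ofList H) sub)

-- ===== PRECONDITION & SPEC =====
-- Pre_ excludes s ≤ 0: there A raises RecursionError in k_subsets whenever the complement
-- graph is nonempty (and always for s < 0), accidentally returning True only when the
-- complement graph is empty; B returns True for s = 0 and raises ValueError for s < 0.
def Pre_independent_set_decision (H : List (String × List (String × Int))) (s : Int) : Prop := 1 ≤ s
instance (H : List (String × List (String × Int))) (s : Int) : Decidable (Pre_independent_set_decision H s) := by unfold Pre_independent_set_decision; infer_instance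

def pvWitness_independent_set_decision : (List (String × List (String × Int))) × Int := ([("a", [])], 1)

def Spec_independent_set_decision (H : List (String × List (String × Int))) (s : Int) (out : Bool) : Prop := out = independent_set_decision_alt H s
instance (H : List (String × List (String × Int))) (s : Int) (out : Bool) : Decidable (Spec_independent_set_decision H s out) := by unfold Spec_independent_set_decision; infer_instance

-- ===== CLAIM (what is proved, stated in full; the proofs are below) =====
def Claim_equal_independent_set_decision : Prop := ∀ (H : List (String × List (String × Int))) (s : Int), Dom_independent_set_decision H s → Pre_independent_set_decision H s → Spec_independent_set_decision H s (independent_set_decision H s)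

-- ===== LEMMAS AND PROOFS =====

-- `u in H[v]` (key membership in the inner dict)
def memH (Hd : PySem.Dict String (List (String × Int))) (v u : String) : Bool :=
  (Hd.getD v []).any (fun p => p.1 == u)

-- the complement-graph edge relation A's double loop realises
def Edge (Hd : PySem.Dict String (List (String × Int))) (ns : List String) (u v : String) : Prop :=
  u ∈ ns ∧ v ∈ ns ∧ ((v.toList < u.toList ∧ memH Hd v u = false) ∨ (u.toList < v.toList ∧ memH Hd u v = false))

def edgeB (G : PySem.Dict String (PySem.Dict String Int)) (u v : String) : Bool :=
  (G.getD u PySem.Dict.empty).contains v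

def innerF (Hd : PySem.Dict String (List (String × Int))) (node1 : String) :
    PySem.Dict String (PySem.Dict String Int) → String → PySem.Dict String (PySem.Dict String Int) :=
  fun G node2 =>
    if PySem.Chars.strLt node2.toList node1.toList then
      if (Hd.getD node2 []).any (fun p => p.1 == node1) then G
      else makeLink G node1 node2
    else G

def buildG (Hd : PySem.Dict String (List (String × Int))) (ns : List String) :
    PySem.Dict String (PySem.Dict String Int) :=
  ns.foldl (fun G node1 => ns.foldl (innerF Hd node1) G) PySem.Dict.empty

lemma isd_eq (H : List (String × List (String × Int))) (s : Int) :
    independent_set_decision H s =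
      if s = 1 then true
      else if kCliqueDecision (buildG (PySem.Dict.ofList H) (PySem.Dict.ofList H).keys) s then true else false := rfl

lemma strLt_iff (a b : List Char) : PySem.Chars.strLt a b = true ↔ a < b := by
  simp [PySem.Chars.strLt]

lemma edgeB_modify (G : PySem.Dict String (PySem.Dict String Int)) (k w u v : String) :
    edgeB (G.modify k PySem.Dict.empty (fun d => d.insert w 1)) u v = true ↔
      edgeB G u v = true ∨ (u = k ∧ v = w) := by
  unfold edgeB
  rw [PySem.Dict.getD_modify]
  by_cases huk : u = k
  · subst huk
    rw [if_pos rfl, PySem.Dict.contains_insert]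
    simp only [Bool.or_eq_true, beq_iff_eq]
    tauto
  · rw [if_neg huk]
    simp [huk]

lemma edgeB_makeLink (G : PySem.Dict String (PySem.Dict String Int)) (a b u v : String) :
    edgeB (makeLink G a b) u v = true ↔ edgeB G u v = true ∨ (u = a ∧ v = b) ∨ (u = b ∧ v = a) := by
  unfold makeLink
  rw [edgeB_modify, edgeB_modify]
  tauto

lemma mem_keys_modify (G : PySem.Dict String (PySem.Dict String Int)) (k : String)
    (f : PySem.Dict String Int → PySem.Dict String Int) (u : String) :
    u ∈ (G.modify k PySem.Dict.empty f).keys ↔ u ∈ G.keys ∨ u = k := by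
  rw [PySem.Dict.keys_modify, PySem.Dict.mem_keys_insert]
  tauto

lemma mem_keys_makeLink (G : PySem.Dict String (PySem.Dict String Int)) (a b u : String) :
    u ∈ (makeLink G a b).keys ↔ u ∈ G.keys ∨ u = a ∨ u = b := by
  unfold makeLink
  rw [mem_keys_modify, mem_keys_modify]
  tauto

lemma nodup_keys_makeLink (G : PySem.Dict String (PySem.Dict String Int)) (a b : String)
    (h : G.keys.Nodup) : (makeLink G a b).keys.Nodup := by
  simp only [makeLink, PySem.Dict.keys_modify]
  exact PySem.Dict.nodup_keys_insert _ _ _ (PySem.Dict.nodup_keys_insert _ _ _ h)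

lemma edgeB_innerF_one (Hd : PySem.Dict String (List (String × Int))) (n1 c u v : String)
    (G : PySem.Dict String (PySem.Dict String Int)) :
    edgeB (innerF Hd n1 G c) u v = true ↔
      edgeB G u v = true ∨ (c.toList < n1.toList ∧ memH Hd c n1 = false ∧
        ((u = n1 ∧ v = c) ∨ (u = c ∧ v = n1))) := by
  unfold innerF
  split_ifs with h1 h2
  · rw [strLt_iff] at h1
    have hm : memH Hd c n1 = true := h2
    simp [hm]
  · rw [strLt_iff] at h1
    have hm : memH Hd c n1 = false := Bool.eq_false_iff.mpr h2
    rw [edgeB_makeLink]; simp [hm, h1]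
  · rw [strLt_iff] at h1
    have : ¬ c.toList < n1.toList := h1
    tauto

lemma edgeB_innerF (Hd : PySem.Dict String (List (String × Int))) (n1 : String) (L : List String)
    (G : PySem.Dict String (PySem.Dict String Int)) (u v : String) :
    edgeB (L.foldl (innerF Hd n1) G) u v = true ↔
      edgeB G u v = true ∨ ∃ n2 ∈ L, n2.toList < n1.toList ∧ memH Hd n2 n1 = false ∧
        ((u = n1 ∧ v = n2) ∨ (u = n2 ∧ v = n1)) := by
  induction L generalizing G with
  | nil => simp
  | cons c L ih =>
    rw [List.foldl_cons, ih, edgeB_innerF_one]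
    constructor
    · rintro (((h | h) | ⟨n2, hn2, h⟩))
      · exact Or.inl h
      · exact Or.inr ⟨c, List.mem_cons_self .., h.1, h.2.1, h.2.2⟩
      · exact Or.inr ⟨n2, List.mem_cons_of_mem _ hn2, h⟩
    · rintro (h | ⟨n2, hn2, h⟩)
      · exact Or.inl (Or.inl h)
      · rcases List.mem_cons.mp hn2 with rfl | hn2
        · exact Or.inl (Or.inr ⟨h.1, h.2.1, h.2.2⟩)
        · exact Or.inr ⟨n2, hn2, h⟩

lemma mem_keys_innerF_one (Hd : PySem.Dict String (List (String × Int))) (n1 c u : String)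
    (G : PySem.Dict String (PySem.Dict String Int)) :
    u ∈ (innerF Hd n1 G c).keys ↔
      u ∈ G.keys ∨ (c.toList < n1.toList ∧ memH Hd c n1 = false ∧ (u = n1 ∨ u = c)) := by
  unfold innerF
  split_ifs with h1 h2
  · rw [strLt_iff] at h1
    have hm : memH Hd c n1 = true := h2
    simp [hm]
  · rw [strLt_iff] at h1
    have hm : memH Hd c n1 = false := Bool.eq_false_iff.mpr h2
    rw [mem_keys_makeLink]; simp [hm, h1]
  · rw [strLt_iff] at h1
    have : ¬ c.toList < n1.toList := h1
    tauto

lemma mem_keys_innerF (Hd : PySem.Dict String (List (String × Int))) (n1 : String) (L : List String)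
    (G : PySem.Dict String (PySem.Dict String Int)) (u : String) :
    u ∈ (L.foldl (innerF Hd n1) G).keys ↔
      u ∈ G.keys ∨ ∃ n2 ∈ L, n2.toList < n1.toList ∧ memH Hd n2 n1 = false ∧ (u = n1 ∨ u = n2) := by
  induction L generalizing G with
  | nil => simp
  | cons c L ih =>
    rw [List.foldl_cons, ih, mem_keys_innerF_one]
    constructor
    · rintro (((h | h) | ⟨n2, hn2, h⟩))
      · exact Or.inl h
      · exact Or.inr ⟨c, List.mem_cons_self .., h.1, h.2.1, h.2.2⟩
      · exact Or.inr ⟨n2, List.mem_cons_of_mem _ hn2, h⟩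
    · rintro (h | ⟨n2, hn2, h⟩)
      · exact Or.inl (Or.inl h)
      · rcases List.mem_cons.mp hn2 with rfl | hn2
        · exact Or.inl (Or.inr ⟨h.1, h.2.1, h.2.2⟩)
        · exact Or.inr ⟨n2, hn2, h⟩

lemma nodup_keys_innerF (Hd : PySem.Dict String (List (String × Int))) (n1 : String) (L : List String)
    (G : PySem.Dict String (PySem.Dict String Int)) (h : G.keys.Nodup) :
    (L.foldl (innerF Hd n1) G).keys.Nodup := by
  induction L generalizing G with
  | nil => exact h
  | cons c L ih =>
    rw [List.foldl_cons]
    apply ih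
    unfold innerF
    split_ifs with h1 h2
    · exact h
    · exact nodup_keys_makeLink _ _ _ h
    · exact h

lemma edgeB_outer (Hd : PySem.Dict String (List (String × Int))) (ns M : List String)
    (G : PySem.Dict String (PySem.Dict String Int)) (u v : String) :
    edgeB (M.foldl (fun G n1 => ns.foldl (innerF Hd n1) G) G) u v = true ↔
      edgeB G u v = true ∨ ∃ n1 ∈ M, ∃ n2 ∈ ns, n2.toList < n1.toList ∧ memH Hd n2 n1 = false ∧
        ((u = n1 ∧ v = n2) ∨ (u = n2 ∧ v = n1)) := by
  induction M generalizing G with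
  | nil => simp
  | cons c M ih =>
    rw [List.foldl_cons, ih, edgeB_innerF]
    constructor
    · rintro (((h | ⟨n2, hn2, h⟩) | ⟨n1, hn1, h⟩))
      · exact Or.inl h
      · exact Or.inr ⟨c, List.mem_cons_self .., n2, hn2, h⟩
      · exact Or.inr ⟨n1, List.mem_cons_of_mem _ hn1, h⟩
    · rintro (h | ⟨n1, hn1, h⟩)
      · exact Or.inl (Or.inl h)
      · rcases List.mem_cons.mp hn1 with rfl | hn1
        · exact Or.inl (Or.inr h)
        · exact Or.inr ⟨n1, hn1, h⟩

lemma mem_keys_outer (Hd : PySem.Dict String (List (String × Int))) (ns M : List String)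
    (G : PySem.Dict String (PySem.Dict String Int)) (u : String) :
    u ∈ (M.foldl (fun G n1 => ns.foldl (innerF Hd n1) G) G).keys ↔
      u ∈ G.keys ∨ ∃ n1 ∈ M, ∃ n2 ∈ ns, n2.toList < n1.toList ∧ memH Hd n2 n1 = false ∧
        (u = n1 ∨ u = n2) := by
  induction M generalizing G with
  | nil => simp
  | cons c M ih =>
    rw [List.foldl_cons, ih, mem_keys_innerF]
    constructor
    · rintro (((h | ⟨n2, hn2, h⟩) | ⟨n1, hn1, h⟩))
      · exact Or.inl h
      · exact Or.inr ⟨c, List.mem_cons_self .., n2, hn2, h⟩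
      · exact Or.inr ⟨n1, List.mem_cons_of_mem _ hn1, h⟩
    · rintro (h | ⟨n1, hn1, h⟩)
      · exact Or.inl (Or.inl h)
      · rcases List.mem_cons.mp hn1 with rfl | hn1
        · exact Or.inl (Or.inr h)
        · exact Or.inr ⟨n1, hn1, h⟩

lemma edge_buildG (Hd : PySem.Dict String (List (String × Int))) (ns : List String) (u v : String) :
    edgeB (buildG Hd ns) u v = true ↔ Edge Hd ns u v := by
  unfold buildG
  rw [edgeB_outer]
  have hbase : edgeB PySem.Dict.empty u v = false := by
    simp [edgeB, PySem.Dict.getD_empty, PySem.Dict.contains_empty]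
  rw [hbase]
  simp only [Bool.false_eq_true, false_or]
  constructor
  · rintro ⟨n1, hn1, n2, hn2, hlt, hm, (⟨rfl, rfl⟩ | ⟨rfl, rfl⟩)⟩
    · exact ⟨hn1, hn2, Or.inl ⟨hlt, hm⟩⟩
    · exact ⟨hn2, hn1, Or.inr ⟨hlt, hm⟩⟩
  · rintro ⟨hu, hv, (⟨hlt, hm⟩ | ⟨hlt, hm⟩)⟩
    · exact ⟨u, hu, v, hv, hlt, hm, Or.inl ⟨rfl, rfl⟩⟩
    · exact ⟨v, hv, u, hu, hlt, hm, Or.inr ⟨rfl, rfl⟩⟩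

lemma mem_keys_buildG (Hd : PySem.Dict String (List (String × Int))) (ns : List String) (u : String) :
    u ∈ (buildG Hd ns).keys ↔ ∃ v, Edge Hd ns u v := by
  unfold buildG
  rw [mem_keys_outer]
  simp only [PySem.Dict.keys_empty, List.not_mem_nil, false_or]
  constructor
  · rintro ⟨n1, hn1, n2, hn2, hlt, hm, (rfl | rfl)⟩
    · exact ⟨n2, hn1, hn2, Or.inl ⟨hlt, hm⟩⟩
    · exact ⟨n1, hn2, hn1, Or.inr ⟨hlt, hm⟩⟩
  · rintro ⟨v, hu, hv, (⟨hlt, hm⟩ | ⟨hlt, hm⟩)⟩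
    · exact ⟨u, hu, v, hv, hlt, hm, Or.inl rfl⟩
    · exact ⟨v, hv, u, hu, hlt, hm, Or.inr rfl⟩

lemma nodup_keys_outer (Hd : PySem.Dict String (List (String × Int))) (ns M : List String)
    (G : PySem.Dict String (PySem.Dict String Int)) (h : G.keys.Nodup) :
    (M.foldl (fun G n1 => ns.foldl (innerF Hd n1) G) G).keys.Nodup := by
  induction M generalizing G with
  | nil => exact h
  | cons c M ih =>
    rw [List.foldl_cons]
    exact ih _ (nodup_keys_innerF Hd c ns G h)

lemma nodup_keys_buildG (Hd : PySem.Dict String (List (String × Int))) (ns : List String) :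
    (buildG Hd ns).keys.Nodup := by
  unfold buildG
  exact nodup_keys_outer Hd ns ns _ (by rw [PySem.Dict.keys_empty]; exact List.nodup_nil)

lemma Edge_symm (Hd : PySem.Dict String (List (String × Int))) (ns : List String) (u v : String) :
    Edge Hd ns u v ↔ Edge Hd ns v u := by
  unfold Edge; tauto

lemma pairOk_comm (Hd : PySem.Dict String (List (String × Int))) (u v : String) :
    pairOk Hd u v = pairOk Hd v u := by
  unfold pairOk
  rcases lt_trichotomy u.toList v.toList with h | h | h
  · rw [if_neg (by rw [strLt_iff]; exact asymm h), if_pos ((strLt_iff _ _).mpr h)]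
  · have : u = v := String.toList_inj.mp h
    subst this; rfl
  · rw [if_pos ((strLt_iff _ _).mpr h), if_neg (by rw [strLt_iff]; exact asymm h)]

lemma pairOk_iff_Edge (Hd : PySem.Dict String (List (String × Int))) (ns : List String)
    (u v : String) (hu : u ∈ ns) (hv : v ∈ ns) (hne : u ≠ v) :
    pairOk Hd u v = true ↔ Edge Hd ns u v := by
  have hne' : u.toList ≠ v.toList := fun h => hne (String.toList_inj.mp h)
  unfold pairOk Edge
  rcases lt_trichotomy u.toList v.toList with h | h | h
  · rw [if_neg (by rw [strLt_iff]; exact asymm h)]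
    constructor
    · intro hb
      refine ⟨hu, hv, Or.inr ⟨h, ?_⟩⟩
      show memH Hd u v = false
      simpa only [Bool.not_eq_true'] using hb
    · rintro ⟨_, _, (⟨hlt, _⟩ | ⟨_, hm⟩)⟩
      · exact absurd h (asymm hlt)
      · show (!(memH Hd u v)) = true
        rw [hm]; rfl
  · exact absurd h hne'
  · rw [if_pos ((strLt_iff _ _).mpr h)]
    constructor
    · intro hb
      refine ⟨hu, hv, Or.inl ⟨h, ?_⟩⟩
      show memH Hd v u = false
      simpa only [Bool.not_eq_true'] using hb
    · rintro ⟨_, _, (⟨_, hm⟩ | ⟨hlt, _⟩)⟩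
      · show (!(memH Hd v u)) = true
        rw [hm]; rfl
      · exact absurd h (asymm hlt)

lemma kSubsets_mem (lst : List String) (k : Int) (x : List String) (hx : x ∈ kSubsets lst k) :
    ∃ y, List.Sublist y lst ∧ x.Perm y ∧ (y.length : Int) = k := by
  induction lst generalizing k x with
  | nil =>
    rw [kSubsets] at hx
    split_ifs at hx with h1 h2 h3
    · simp at hx
    · simp only [List.mem_singleton] at hx
      exact ⟨[], List.Sublist.refl _, by simp [hx], by simpa using h2⟩
    · simp at hx
    · simp at hx
  | cons a tail ih =>
    rw [kSubsets] at hx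
    split_ifs at hx with h1 h2 h3
    · simp at hx
    · simp only [List.mem_singleton] at hx
      exact ⟨a :: tail, List.Sublist.refl _, by simp [hx], h2⟩
    · subst h3
      simp only [List.mem_map] at hx
      obtain ⟨i, hi, rfl⟩ := hx
      exact ⟨[i], List.singleton_sublist.mpr hi, List.Perm.refl _, by simp⟩
    · simp only [List.mem_append, List.mem_map] at hx
      rcases hx with hx | ⟨x', hx', rfl⟩
      · obtain ⟨y, hy, hp, hl⟩ := ih k x hx
        exact ⟨y, hy.cons a, hp, hl⟩
      · obtain ⟨y', hy', hp', hl'⟩ := ih (k - 1) x' hx'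
        refine ⟨a :: y', List.Sublist.cons₂ a hy', ?_, by simp only [List.length_cons]; push_cast; omega⟩
        exact (List.perm_append_singleton a x').trans (hp'.cons a)

lemma kSubsets_complete (lst : List String) (k : Int) (y : List String)
    (hy : List.Sublist y lst) (hlen : (y.length : Int) = k) (hk : 1 ≤ k) :
    ∃ x ∈ kSubsets lst k, x.Perm y := by
  induction lst generalizing k y with
  | nil =>
    have := List.sublist_nil.mp hy
    subst this; simp at hlen; omega
  | cons a tail ih =>
    rw [kSubsets]
    split_ifs with h1 h2 h3
    · exfalso
      have hle := hy.length_le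
      simp only [List.length_cons] at hle h1
      omega
    · have hyl : y.length = (a :: tail).length := by
        have := h2; simp only [List.length_cons] at this ⊢; omega
      have := hy.eq_of_length hyl
      subst this
      exact ⟨a :: tail, List.mem_singleton.mpr rfl, List.Perm.refl _⟩
    · subst h3
      have : y.length = 1 := by omega
      obtain ⟨b, rfl⟩ := List.length_eq_one_iff.mp this
      have hb : b ∈ a :: tail := List.singleton_sublist.mp hy
      exact ⟨[b], List.mem_map.mpr ⟨b, hb, rfl⟩, List.Perm.refl _⟩
    · rcases List.sublist_cons_iff.mp hy with hyt | ⟨r, rfl, hr⟩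
      · obtain ⟨x, hx, hp⟩ := ih k y hyt hlen hk
        exact ⟨x, List.mem_append.mpr (Or.inl hx), hp⟩
      · have hk2 : 2 ≤ k := by
          rcases lt_or_eq_of_le hk with h | h
          · omega
          · exact absurd h.symm h3
        obtain ⟨x', hx', hp'⟩ := ih (k - 1) r hr (by simp at hlen ⊢; omega) (by omega)
        refine ⟨x' ++ [a], List.mem_append.mpr (Or.inr (List.mem_map.mpr ⟨x', hx', rfl⟩)), ?_⟩
        exact (List.perm_append_singleton a x').trans (hp'.cons a)

lemma indepAll_iff (Hd : PySem.Dict String (List (String × Int))) (S : List String) :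
    indepAll Hd S = true ↔ S.Pairwise (fun u v => pairOk Hd u v = true) := by
  induction S with
  | nil => simp [indepAll]
  | cons u rest ih =>
    simp [indepAll, List.pairwise_cons, ih, List.all_eq_true, and_comm]

lemma pair_sublist_of_mem (S : List String) (u v : String) (hu : u ∈ S) (hv : v ∈ S) (hne : u ≠ v) :
    List.Sublist [u, v] S ∨ List.Sublist [v, u] S := by
  induction S with
  | nil => simp at hu
  | cons a t ih =>
    by_cases hua : u = a
    · subst hua
      have hvt : v ∈ t := by
        rcases List.mem_cons.mp hv with h | h
        · exact absurd h.symm hne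
        · exact h
      exact Or.inl (List.Sublist.cons₂ u (List.singleton_sublist.mpr hvt))
    · by_cases hva : v = a
      · subst hva
        have hut : u ∈ t := by
          rcases List.mem_cons.mp hu with h | h
          · exact absurd h hua
          · exact h
        exact Or.inr (List.Sublist.cons₂ v (List.singleton_sublist.mpr hut))
      · have hut : u ∈ t := by
          rcases List.mem_cons.mp hu with h | h
          · exact absurd h hua
          · exact h
        have hvt : v ∈ t := by
          rcases List.mem_cons.mp hv with h | h
          · exact absurd h hva
          · exact h
        exact (ih hut hvt).imp (·.cons a) (·.cons a)

lemma perm_pair (x : List String) (u v : String) (h : x.Perm [u, v]) :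
    x = [u, v] ∨ x = [v, u] := by
  have hlen := h.length_eq
  match x with
  | [a, b] =>
    have ha : a ∈ [u, v] := h.mem_iff.mp (by simp)
    rcases List.mem_pair.mp ha with rfl | rfl
    · have : [b].Perm [v] := (h.cons_inv)
      rw [List.perm_singleton.mp this]
      exact Or.inl rfl
    · have h' : ([a, b] : List String).Perm [a, u] := h.trans (List.Perm.swap a u [])
      have : [b].Perm [u] := h'.cons_inv
      rw [List.perm_singleton.mp this]
      exact Or.inr rfl

lemma isClique_buildG_iff (Hd : PySem.Dict String (List (String × Int))) (ns : List String)
    (S : List String) :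
    isClique (buildG Hd ns) S = true ↔ ∀ u v, List.Sublist [u, v] S → Edge Hd ns u v := by
  unfold isClique
  rw [List.all_eq_true]
  have hget : ∀ (u v : String), (PySem.List.pyGetD [u, v] 0 "" = u) ∧ (PySem.List.pyGetD [u, v] 1 "" = v) := by
    intro u v
    constructor <;> rfl
  constructor
  · intro hcl u v hsub
    obtain ⟨x, hx, hp⟩ := kSubsets_complete S 2 [u, v] hsub (by simp) (by omega)
    rcases perm_pair x u v hp with rfl | rfl
    · have := hcl _ hx
      rw [(hget u v).1, (hget u v).2] at this
      exact (edge_buildG Hd ns u v).mp this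
    · have := hcl _ hx
      rw [(hget v u).1, (hget v u).2] at this
      exact (Edge_symm ..).mp ((edge_buildG Hd ns v u).mp this)
  · intro h x hx
    obtain ⟨y, hy, hp, hl⟩ := kSubsets_mem S 2 x hx
    have : y.length = 2 := by omega
    obtain ⟨u, v, rfl⟩ : ∃ u v, y = [u, v] := by
      match y, this with
      | [u, v], _ => exact ⟨u, v, rfl⟩
    have he : Edge Hd ns u v := h u v hy
    rcases perm_pair x u v hp with rfl | rfl
    · rw [(hget u v).1, (hget u v).2]
      exact (edge_buildG Hd ns u v).mpr he
    · rw [(hget v u).1, (hget v u).2]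
      exact (edge_buildG Hd ns v u).mpr ((Edge_symm ..).mp he)

lemma pairwise_edge_of_all (Hd : PySem.Dict String (List (String × Int))) (ns : List String)
    (z : List String) (hnd : z.Nodup)
    (h : ∀ u v, u ∈ z → v ∈ z → u ≠ v → Edge Hd ns u v) : z.Pairwise (Edge Hd ns) := by
  rw [List.pairwise_iff_forall_sublist]
  intro u v hsub
  have hne : u ≠ v := by
    have := List.Nodup.sublist hsub hnd
    simp at this
    exact this
  exact h u v (hsub.subset (by simp)) (hsub.subset (by simp)) hne

lemma kclique_iff (Hd : PySem.Dict String (List (String × Int))) (ns : List String) (s : Int)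
    (hs : 2 ≤ s) :
    kCliqueDecision (buildG Hd ns) s = true ↔
      ∃ z, List.Sublist z (buildG Hd ns).keys ∧ (z.length : Int) = s ∧ z.Pairwise (Edge Hd ns) := by
  have hknd : (buildG Hd ns).keys.Nodup := nodup_keys_buildG Hd ns
  unfold kCliqueDecision
  simp only [List.any_eq_true, PySem.List.mem_pyRange_one]
  constructor
  · rintro ⟨i, ⟨hsi, hilen⟩, x, hx, hcl⟩
    obtain ⟨y, hy, hp, hl⟩ := kSubsets_mem _ i x hx
    have hynd : y.Nodup := List.Nodup.sublist hy hknd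
    have hpw : y.Pairwise (Edge Hd ns) := by
      apply pairwise_edge_of_all _ _ _ hynd
      intro u v hu hv hne
      have hux : u ∈ x := hp.mem_iff.mpr hu
      have hvx : v ∈ x := hp.mem_iff.mpr hv
      rcases pair_sublist_of_mem x u v hux hvx hne with hsub | hsub
      · exact (isClique_buildG_iff ..).mp hcl u v hsub
      · exact (Edge_symm ..).mp ((isClique_buildG_iff ..).mp hcl v u hsub)
    refine ⟨y.take s.toNat, (List.take_sublist _ _).trans hy, ?_, List.Pairwise.sublist (List.take_sublist _ _) hpw⟩
    have : s.toNat ≤ y.length := by omega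
    simp [List.length_take, this]
    omega
  · rintro ⟨z, hz, hlen, hpw⟩
    refine ⟨s, ⟨le_refl _, ?_⟩, ?_⟩
    · have := hz.length_le
      omega
    · obtain ⟨x, hx, hp⟩ := kSubsets_complete _ s z hz hlen (by omega)
      refine ⟨x, hx, ?_⟩
      rw [isClique_buildG_iff]
      intro u v hsub
      have hznd : z.Nodup := List.Nodup.sublist hz hknd
      have hxnd : x.Nodup := hp.nodup_iff.mpr hznd
      have hne : u ≠ v := by
        have := List.Nodup.sublist hsub hxnd
        simp at this
        exact this
      have hu : u ∈ z := hp.mem_iff.mp (hsub.subset (by simp))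
      have hv : v ∈ z := hp.mem_iff.mp (hsub.subset (by simp))
      rcases pair_sublist_of_mem z u v hu hv hne with hs' | hs'
      · exact List.pairwise_iff_forall_sublist.mp hpw hs'
      · exact (Edge_symm ..).mp (List.pairwise_iff_forall_sublist.mp hpw hs')

lemma alt_iff (H : List (String × List (String × Int))) (s : Int) (hs : 2 ≤ s) :
    independent_set_decision_alt H s = true ↔
      ∃ S, List.Sublist S (PySem.Dict.ofList H).keys ∧ (S.length : Int) = s ∧
        S.Pairwise (fun u v => pairOk (PySem.Dict.ofList H) u v = true) := by
  unfold independent_set_decision_alt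
  rw [if_neg (by omega)]
  by_cases hbig : ((PySem.Dict.ofList H).keys.length : Int) < s
  · rw [if_pos hbig]
    simp only [Bool.false_eq_true, false_iff]
    rintro ⟨S, hsub, hlen, _⟩
    have := hsub.length_le
    omega
  · rw [if_neg hbig]
    simp only [List.any_eq_true, PySem.List.mem_combinations_iff, indepAll_iff]
    constructor
    · rintro ⟨S, ⟨hsub, hlen⟩, hpw⟩
      exact ⟨S, hsub, by omega, hpw⟩
    · rintro ⟨S, hsub, hlen, hpw⟩
      exact ⟨S, ⟨hsub, by omega⟩, hpw⟩

lemma two_distinct (S : List String) (hnd : S.Nodup) (hlen : 2 ≤ S.length) (u : String)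
    (hu : u ∈ S) : ∃ v ∈ S, v ≠ u := by
  match S, hnd, hlen with
  | a :: b :: t, hnd, _ =>
    by_cases hua : u = a
    · refine ⟨b, by simp, ?_⟩
      subst hua
      intro hb
      simp [hb] at hnd
    · exact ⟨a, by simp, fun h => hua (h.symm)⟩

lemma main_bridge (H : List (String × List (String × Int))) (s : Int) (hs : 2 ≤ s) :
    (kCliqueDecision (buildG (PySem.Dict.ofList H) (PySem.Dict.ofList H).keys) s = true ↔
      independent_set_decision_alt H s = true) := by
  set Hd := PySem.Dict.ofList H with hHd
  set ns := Hd.keys with hns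
  have hnsnd : ns.Nodup := PySem.Dict.nodup_keys_ofList H
  have hknd : (buildG Hd ns).keys.Nodup := nodup_keys_buildG Hd ns
  rw [kclique_iff Hd ns s hs, alt_iff H s hs]
  constructor
  · rintro ⟨z, hz, hlen, hpw⟩
    have hznd : z.Nodup := List.Nodup.sublist hz hknd
    have hzsub : ∀ u ∈ z, u ∈ ns := by
      intro u hu
      have := hz.subset hu
      obtain ⟨v, hE⟩ := (mem_keys_buildG Hd ns u).mp this
      exact hE.1
    obtain ⟨S, hSperm, hSsub⟩ := List.Nodup.subperm hznd hzsub
    have hSnd : S.Nodup := List.Nodup.sublist hSsub hnsnd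
    have hall : ∀ u v, u ∈ z → v ∈ z → u ≠ v → Edge Hd ns u v := by
      intro u v hu hv hne
      rcases pair_sublist_of_mem z u v hu hv hne with hsub | hsub
      · exact List.pairwise_iff_forall_sublist.mp hpw hsub
      · exact (Edge_symm ..).mp (List.pairwise_iff_forall_sublist.mp hpw hsub)
    refine ⟨S, hSsub, by rw [hSperm.length_eq]; omega, ?_⟩
    rw [List.pairwise_iff_forall_sublist]
    intro u v hsub
    have hne : u ≠ v := by
      have := List.Nodup.sublist hsub hSnd
      simp at this
      exact this
    have hu : u ∈ z := hSperm.mem_iff.mp (hsub.subset (by simp))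
    have hv : v ∈ z := hSperm.mem_iff.mp (hsub.subset (by simp))
    exact (pairOk_iff_Edge Hd ns u v (hzsub u hu) (hzsub v hv) hne).mpr (hall u v hu hv hne)
  · rintro ⟨S, hSsub, hlen, hpw⟩
    have hSnd : S.Nodup := List.Nodup.sublist hSsub hnsnd
    have hall : ∀ u v, u ∈ S → v ∈ S → u ≠ v → Edge Hd ns u v := by
      intro u v hu hv hne
      have hOk : pairOk Hd u v = true := by
        rcases pair_sublist_of_mem S u v hu hv hne with hsub | hsub
        · exact List.pairwise_iff_forall_sublist.mp hpw hsub
        · rw [pairOk_comm]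
          exact List.pairwise_iff_forall_sublist.mp hpw hsub
      exact (pairOk_iff_Edge Hd ns u v (hSsub.subset hu) (hSsub.subset hv) hne).mp hOk
    have hSkeys : ∀ u ∈ S, u ∈ (buildG Hd ns).keys := by
      intro u hu
      obtain ⟨v, hv, hne⟩ := two_distinct S hSnd (by omega) u hu
      exact (mem_keys_buildG Hd ns u).mpr ⟨v, hall u v hu hv (fun h => hne h.symm)⟩
    obtain ⟨z, hzperm, hzsub⟩ := List.Nodup.subperm hSnd hSkeys
    have hznd : z.Nodup := List.Nodup.sublist hzsub hknd
    refine ⟨z, hzsub, by rw [hzperm.length_eq]; omega, ?_⟩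
    apply pairwise_edge_of_all _ _ _ hznd
    intro u v hu hv hne
    exact hall u v (hzperm.mem_iff.mp hu) (hzperm.mem_iff.mp hv) hne

-- ===== VERDICT (by name: the statement is the Claim_ definition above) =====
theorem independent_set_decision_spec : Claim_equal_independent_set_decision := by
  intro H s hdom hpre
  unfold Spec_independent_set_decision
  rw [isd_eq]
  by_cases hs1 : s = 1
  · rw [if_pos hs1]
    unfold independent_set_decision_alt
    rw [if_pos hs1]
  · rw [if_neg hs1]
    have hs2 : 2 ≤ s := by unfold Pre_independent_set_decision at hpre; omega
    have hIf : (if kCliqueDecision (buildG (PySem.Dict.ofList H) (PySem.Dict.ofList H).keys) s then true else false) = kCliqueDecision (buildG (PySem.Dict.ofList H) (PySem.Dict.ofList H).keys) s := by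
      split_ifs with h
      · exact h.symm
      · exact (Bool.eq_false_iff.mpr h).symm
    rw [hIf, Bool.eq_iff_iff]
    exact main_bridge H s hs2
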